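-- pv_equiv track=rewrite | github.com/CloudSearch1/muti-agent | src/tools/guardrails.py | _count_ping_pong_patterns
-- ===== SOURCE A (Python) =====
-- def _count_ping_pong_patterns(signatures: list[str]) -> int:
--     """
--     计算乒乓模式的出现次数
--
--     例如: [A, B, A, B, A, B] 表示 3 次 A-B 切换
--     """
--     if len(signatures) < 4:
--         return 0
--
--     # 找出最近的历史中的乒乓模式
--     count = 0
--     i = len(signatures) - 1
--
--     while i >= 3:
--         # 检查 A -> B -> A -> B 模式
--         if (
--             signatures[i] == signatures[i - 2]
--             and signatures[i - 1] == signatures[i - 3]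
--             and signatures[i] != signatures[i - 1]
--         ):
--             count += 1
--             i -= 2  # 跳过这对
--         else:
--             break
--
--     return count
-- ===== SOURCE B (Python) =====
-- def _count_ping_pong_patterns(signatures: list[str]) -> int:
--     # Alternating-suffix length instead of windowed stepping: extend L while the
--     # suffix keeps alternating a,b,a,b... then the count is (L-2)//2.
--     n = len(signatures)
--     if n < 4:
--         return 0
--     a = signatures[-1]
--     b = signatures[-2]
--     if a == b:
--         return 0
--     L = 2
--     while L < n and signatures[n - 1 - L] == (a if L % 2 == 0 else b):
--         L += 1
--     return (L - 2) // 2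
-- ===== Notes on version B (the rewrite author's own statement) =====
-- stated objective: simpler
-- what changed: Replaces A's 4-element-window scan that counts while stepping i back by 2 with a single alternating-suffix length L (each element compared directly against the two tail values a,b by parity) and the closed form (L-2)//2.
import Mathlib
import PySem

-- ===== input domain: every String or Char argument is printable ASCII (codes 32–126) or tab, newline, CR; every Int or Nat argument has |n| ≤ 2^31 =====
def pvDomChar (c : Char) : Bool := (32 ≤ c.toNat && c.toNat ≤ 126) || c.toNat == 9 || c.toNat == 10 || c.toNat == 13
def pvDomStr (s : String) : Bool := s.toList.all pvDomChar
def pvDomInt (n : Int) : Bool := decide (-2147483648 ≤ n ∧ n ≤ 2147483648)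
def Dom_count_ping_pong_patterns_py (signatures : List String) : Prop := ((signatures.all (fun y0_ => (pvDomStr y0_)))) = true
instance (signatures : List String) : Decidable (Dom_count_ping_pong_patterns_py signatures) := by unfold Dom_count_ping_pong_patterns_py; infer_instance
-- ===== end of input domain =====

-- B replaces A's windowed count-and-step-by-2 scan by a single alternating-suffix
-- length L and the closed form (L-2)//2 (objective: simpler decomposition).

-- ===== PORT A =====
-- A's while loop: state (count, i), same three checks, i -= 2 on success.
-- All indices are in range here (3 ≤ i ≤ len-1), so `.getD ""` is exact.
def pvALoop (s : List String) (count : Int) (i : Int) : Int :=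
  if _h : 3 ≤ i then
    if (PySem.List.pyGet? s i).getD "" = (PySem.List.pyGet? s (i-2)).getD ""
        ∧ (PySem.List.pyGet? s (i-1)).getD "" = (PySem.List.pyGet? s (i-3)).getD ""
        ∧ (PySem.List.pyGet? s i).getD "" ≠ (PySem.List.pyGet? s (i-1)).getD "" then
      pvALoop s (count+1) (i-2)
    else count
  else count
termination_by i.toNat
decreasing_by omega

def count_ping_pong_patterns_py (signatures : List String) : Int :=
  if (signatures.length : Int) < 4 then 0
  else pvALoop signatures 0 ((signatures.length : Int) - 1)

-- ===== PORT B =====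
-- B's while loop: extend the alternating-suffix length L one step at a time.
-- The index n-1-L is in range here (0 ≤ n-1-L ≤ n-3), so `.getD ""` is exact.
def pvBLoop (s : List String) (a b : String) (L : Int) : Int :=
  if _h : L < (s.length : Int) then
    if (PySem.List.pyGet? s ((s.length : Int) - 1 - L)).getD ""
        = (if PySem.Int.mod L 2 = 0 then a else b) then
      pvBLoop s a b (L+1)
    else L
  else L
termination_by ((s.length : Int) - L).toNat
decreasing_by omega

def count_ping_pong_patterns_py_alt (signatures : List String) : Int :=
  if (signatures.length : Int) < 4 then 0
  else
    let a := (PySem.List.pyGet? signatures (-1)).getD ""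
    let b := (PySem.List.pyGet? signatures (-2)).getD ""
    if a = b then 0
    else PySem.Int.floordiv (pvBLoop signatures a b 2 - 2) 2

-- ===== PRECONDITION & SPEC =====
def Spec_count_ping_pong_patterns_py (signatures : List String) (out : Int) : Prop := out = count_ping_pong_patterns_py_alt signatures
instance (signatures : List String) (out : Int) : Decidable (Spec_count_ping_pong_patterns_py signatures out) := by unfold Spec_count_ping_pong_patterns_py; infer_instance

-- ===== CLAIM (what is proved, stated in full; the proofs are below) =====
def Claim_equal_count_ping_pong_patterns_py : Prop := ∀ (signatures : List String), Dom_count_ping_pong_patterns_py signatures → Spec_count_ping_pong_patterns_py signatures (count_ping_pong_patterns_py signatures)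

-- ===== LEMMAS AND PROOFS =====

-- element at distance d from the end
def pvAt (s : List String) (d : Nat) : String := s.getD (s.length - 1 - d) ""

theorem pvGetD_at (s : List String) (i : Int) (d : Nat)
    (hi : i = (s.length : Int) - 1 - (d : Int)) (hd : d < s.length) :
    (PySem.List.pyGet? s i).getD "" = pvAt s d := by
  have h : i = ((s.length - 1 - d : Nat) : Int) := by omega
  rw [h, PySem.List.pyGet?_natCast, pvAt, List.getD_eq_getElem?_getD]

-- one-step / stop equations for the two loops (to direct rewriting)
theorem pvALoop_step (s : List String) (t i : Int) (h : 3 ≤ i)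
    (hc : (PySem.List.pyGet? s i).getD "" = (PySem.List.pyGet? s (i-2)).getD ""
        ∧ (PySem.List.pyGet? s (i-1)).getD "" = (PySem.List.pyGet? s (i-3)).getD ""
        ∧ (PySem.List.pyGet? s i).getD "" ≠ (PySem.List.pyGet? s (i-1)).getD "") :
    pvALoop s t i = pvALoop s (t+1) (i-2) := by
  rw [pvALoop, dif_pos h, if_pos hc]

theorem pvALoop_stop (s : List String) (t i : Int) (h : 3 ≤ i)
    (hc : ¬((PySem.List.pyGet? s i).getD "" = (PySem.List.pyGet? s (i-2)).getD ""
        ∧ (PySem.List.pyGet? s (i-1)).getD "" = (PySem.List.pyGet? s (i-3)).getD ""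
        ∧ (PySem.List.pyGet? s i).getD "" ≠ (PySem.List.pyGet? s (i-1)).getD "")) :
    pvALoop s t i = t := by
  rw [pvALoop, dif_pos h, if_neg hc]

theorem pvALoop_end (s : List String) (t i : Int) (h : ¬ 3 ≤ i) :
    pvALoop s t i = t := by
  rw [pvALoop, dif_neg h]

theorem pvBLoop_step (s : List String) (a b : String) (L : Int) (h : L < (s.length : Int))
    (hc : (PySem.List.pyGet? s ((s.length : Int) - 1 - L)).getD ""
        = (if PySem.Int.mod L 2 = 0 then a else b)) :
    pvBLoop s a b L = pvBLoop s a b (L+1) := by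
  rw [pvBLoop, dif_pos h, if_pos hc]

theorem pvBLoop_stop (s : List String) (a b : String) (L : Int) (h : L < (s.length : Int))
    (hc : ¬ (PySem.List.pyGet? s ((s.length : Int) - 1 - L)).getD ""
        = (if PySem.Int.mod L 2 = 0 then a else b)) :
    pvBLoop s a b L = L := by
  rw [pvBLoop, dif_pos h, if_neg hc]

theorem pvBLoop_end (s : List String) (a b : String) (L : Int) (h : ¬ L < (s.length : Int)) :
    pvBLoop s a b L = L := by
  rw [pvBLoop, dif_neg h]

theorem pvBLoop_ge_aux (s : List String) (a b : String) :
    ∀ (k : Nat) (L : Int), (s.length : Int) ≤ L + k → L ≤ pvBLoop s a b L := by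
  intro k
  induction k with
  | zero => intro L h; rw [pvBLoop_end s a b L (by omega)]
  | succ k ih =>
    intro L h
    by_cases hL : L < (s.length : Int)
    · by_cases hc : (PySem.List.pyGet? s ((s.length : Int) - 1 - L)).getD ""
          = (if PySem.Int.mod L 2 = 0 then a else b)
      · rw [pvBLoop_step s a b L hL hc]
        have := ih (L+1) (by omega)
        omega
      · rw [pvBLoop_stop s a b L hL hc]
    · rw [pvBLoop_end s a b L hL]

theorem pvBLoop_ge (s : List String) (a b : String) (L : Int) :
    L ≤ pvBLoop s a b L := by
  by_cases hL : L < (s.length : Int)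
  · exact pvBLoop_ge_aux s a b ((s.length : Int) - L).toNat L (by omega)
  · rw [pvBLoop_end s a b L hL]

theorem pvMod_even (c : Int) : PySem.Int.mod (2*c+2) 2 = 0 := by
  rw [PySem.Int.mod_eq_emod_of_pos (by norm_num)]; omega

theorem pvMod_odd (c : Int) : PySem.Int.mod (2*c+3) 2 ≠ 0 := by
  rw [PySem.Int.mod_eq_emod_of_pos (by norm_num)]; omega

theorem pvMain (s : List String) (a b : String) (hab : a ≠ b) :
    ∀ (k c : Nat), s.length ≤ 2*c + k → 2*c + 2 ≤ s.length →
    pvAt s (2*c) = a → pvAt s (2*c+1) = b →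
    ∀ t : Int, pvALoop s t ((s.length : Int) - 1 - 2*(c : Int))
      = t + (pvBLoop s a b (2*(c : Int)+2) - (2*(c : Int)+2)) / 2 := by
  intro k
  induction k with
  | zero => intro c h1 h2; omega
  | succ k ih =>
    intro c h1 h2 hca hccb t
    have e0 : (PySem.List.pyGet? s ((s.length : Int) - 1 - 2*(c : Int))).getD "" = pvAt s (2*c) :=
      pvGetD_at s _ (2*c) (by push_cast; ring) (by omega)
    have e1 : (PySem.List.pyGet? s ((s.length : Int) - 1 - 2*(c : Int) - 1)).getD "" = pvAt s (2*c+1) :=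
      pvGetD_at s _ (2*c+1) (by push_cast; ring) (by omega)
    by_cases hbig : 2*c + 4 ≤ s.length
    · -- the A-window fits: one A step corresponds to two B steps
      have e2 : (PySem.List.pyGet? s ((s.length : Int) - 1 - 2*(c : Int) - 2)).getD "" = pvAt s (2*c+2) :=
        pvGetD_at s _ (2*c+2) (by push_cast; ring) (by omega)
      have e3 : (PySem.List.pyGet? s ((s.length : Int) - 1 - 2*(c : Int) - 3)).getD "" = pvAt s (2*c+3) :=
        pvGetD_at s _ (2*c+3) (by push_cast; ring) (by omega)
      have eb2 : (PySem.List.pyGet? s ((s.length : Int) - 1 - (2*(c : Int)+2))).getD "" = pvAt s (2*c+2) :=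
        pvGetD_at s _ (2*c+2) (by push_cast; ring) (by omega)
      have eb3 : (PySem.List.pyGet? s ((s.length : Int) - 1 - (2*(c : Int)+2+1))).getD "" = pvAt s (2*c+3) :=
        pvGetD_at s _ (2*c+3) (by push_cast; ring) (by omega)
      have hoddc : ¬ PySem.Int.mod (2*(c:Int)+2+1) 2 = 0 := by
        have := pvMod_odd (c:Int); rwa [show (2*(c:Int)+3) = 2*(c:Int)+2+1 by ring] at this
      by_cases h2a : pvAt s (2*c+2) = a
      · by_cases h3b : pvAt s (2*c+3) = b
        · -- A step succeeds, B takes two steps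
          have hB : pvBLoop s a b (2*(c : Int)+2) = pvBLoop s a b (2*((c+1 : Nat) : Int)+2) := by
            rw [pvBLoop_step s a b _ (by omega) (by rw [eb2, h2a, pvMod_even, if_pos rfl]),
                pvBLoop_step s a b _ (by omega) (by rw [eb3, h3b, if_neg hoddc])]
            push_cast; ring_nf
          rw [pvALoop_step s t _ (by omega) (by rw [e0, e1, e2, e3, hca, hccb]; exact ⟨h2a.symm, h3b.symm, hab⟩)]
          have hA : (s.length : Int) - 1 - 2*(c : Int) - 2 = (s.length : Int) - 1 - 2*((c+1 : Nat) : Int) := by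
            push_cast; ring
          rw [hA, ih (c+1) (by omega) (by omega)
            (by rwa [show 2*(c+1) = 2*c+2 by ring]) (by rwa [show 2*(c+1)+1 = 2*c+3 by ring]) (t+1), hB]
          have hge := pvBLoop_ge s a b (2*((c+1 : Nat) : Int)+2)
          push_cast at hge ⊢
          omega
        · -- second pair breaks: A stops; B takes one step then stops
          rw [pvALoop_stop s t _ (by omega) (by rw [e0, e1, e2, e3, hca, hccb]; rintro ⟨-, hb', -⟩; exact h3b hb'.symm)]
          rw [pvBLoop_step s a b _ (by omega) (by rw [eb2, h2a, pvMod_even, if_pos rfl]),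
              pvBLoop_stop s a b _ (by omega) (by rw [eb3, if_neg hoddc]; exact fun h => h3b h)]
          omega
      · -- first pair breaks: both stop immediately
        rw [pvALoop_stop s t _ (by omega) (by rw [e0, e1, e2, e3, hca, hccb]; rintro ⟨ha', -, -⟩; exact h2a ha'.symm)]
        rw [pvBLoop_stop s a b _ (by omega) (by rw [eb2, pvMod_even, if_pos rfl]; exact fun h => h2a h)]
        omega
    · -- fewer than 4 elements left: A's guard fails; B gains at most one step
      rw [pvALoop_end s t _ (by omega)]
      by_cases hn : s.length = 2*c + 2
      · rw [pvBLoop_end s a b _ (by omega)]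
        omega
      · have hn3 : s.length = 2*c + 3 := by omega
        by_cases hc2 : (PySem.List.pyGet? s ((s.length : Int) - 1 - (2*(c:Int)+2))).getD ""
            = (if PySem.Int.mod (2*(c:Int)+2) 2 = 0 then a else b)
        · rw [pvBLoop_step s a b _ (by omega) hc2, pvBLoop_end s a b _ (by omega)]
          omega
        · rw [pvBLoop_stop s a b _ (by omega) hc2]; omega

theorem pvGetD_neg (s : List String) (k : Nat) (h1 : 0 < k) (h2 : k ≤ s.length) :
    (PySem.List.pyGet? s (-(k : Int))).getD "" = pvAt s (k-1) := by
  rw [PySem.List.pyGet?_neg_natCast s k h1 h2, pvAt, List.getD_eq_getElem?_getD]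
  congr 2
  omega

-- ===== VERDICT (by name: the statement is the Claim_ definition above) =====
theorem count_ping_pong_patterns_py_spec : Claim_equal_count_ping_pong_patterns_py := by
  intro s _
  unfold Spec_count_ping_pong_patterns_py count_ping_pong_patterns_py count_ping_pong_patterns_py_alt
  by_cases h4 : (s.length : Int) < 4
  · rw [if_pos h4, if_pos h4]
  · rw [if_neg h4, if_neg h4]
    have hn : 4 ≤ s.length := by omega
    have ea : (PySem.List.pyGet? s (-1)).getD "" = pvAt s 0 := by
      have := pvGetD_neg s 1 (by omega) (by omega); norm_num at this ⊢; exact this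
    have eb : (PySem.List.pyGet? s (-2)).getD "" = pvAt s 1 := by
      have := pvGetD_neg s 2 (by omega) (by omega); norm_num at this ⊢; exact this
    simp only [ea, eb]
    have e0 : (PySem.List.pyGet? s ((s.length : Int) - 1)).getD "" = pvAt s 0 :=
      pvGetD_at s _ 0 (by push_cast; ring) (by omega)
    have e1 : (PySem.List.pyGet? s ((s.length : Int) - 1 - 1)).getD "" = pvAt s 1 :=
      pvGetD_at s _ 1 (by push_cast; ring) (by omega)
    by_cases hab : pvAt s 0 = pvAt s 1
    · rw [if_pos hab, pvALoop_stop s 0 _ (by omega) (by rintro ⟨-, -, hne⟩; exact hne (by rw [e0, e1, hab]))]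
    · rw [if_neg hab]
      have := pvMain s (pvAt s 0) (pvAt s 1) hab s.length 0 (by omega) (by omega)
        (by norm_num) (by norm_num) 0
      have h0 : ((s.length : Int) - 1 - 2*((0:Nat):Int)) = (s.length : Int) - 1 := by push_cast; ring
      rw [h0] at this
      rw [this, PySem.Int.floordiv_eq_ediv_of_pos (by norm_num)]
      push_cast
      norm_num
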